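-- pv_equiv track=rewrite | github.com/GreatHorn/content | Scripts/script-PcapHTTPExtractor.py | _fix_key
-- ===== SOURCE A (Python) =====
-- def _fix_key(keys_list):
--     """
--     Fix the key to abide the context
--     :param keys_list:
--     :return:
--     """
--     key_name = ""
--     for k in keys_list:
--         if "_" in k:
--             key_name += _fix_key(k.split("_"))
--         else:
--             key_name += k.capitalize()
--
--     return key_name
-- ===== SOURCE B (Python) =====
-- def _fix_key(keys_list):
--     """
--     Fix the key to abide the context
--     :param keys_list:
--     :return:
--     """
--     return "".join(p.capitalize() for k in keys_list for p in k.split("_"))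
-- ===== Notes on version B (the rewrite author's own statement) =====
-- stated objective: simpler
-- what changed: Replaced the recursive accumulate-and-branch loop with a single flat comprehension that splits every key on '_' and joins the capitalized pieces (split('_') leaves no underscores, so A's recursion is only ever one level deep).
import Mathlib
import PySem

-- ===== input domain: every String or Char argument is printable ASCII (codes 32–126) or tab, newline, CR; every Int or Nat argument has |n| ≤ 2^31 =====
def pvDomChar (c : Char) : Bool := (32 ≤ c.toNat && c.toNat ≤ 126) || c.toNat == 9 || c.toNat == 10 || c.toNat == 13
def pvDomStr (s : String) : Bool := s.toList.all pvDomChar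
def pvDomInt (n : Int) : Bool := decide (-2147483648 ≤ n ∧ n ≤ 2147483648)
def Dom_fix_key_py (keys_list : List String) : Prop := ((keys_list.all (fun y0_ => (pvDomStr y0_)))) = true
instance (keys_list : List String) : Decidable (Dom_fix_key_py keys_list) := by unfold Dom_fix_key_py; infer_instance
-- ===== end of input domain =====

-- B replaces A's self-recursion by one flat split-on-'_'-and-capitalize pass (objective: simpler).

-- ===== PORT A =====
-- shared builtin ports and the lemmas the port's decreasing_by cites:
def pvSpl : List Char → List (List Char)
  | [] => [[]]
  | c :: t => if c = '_' then [] :: pvSpl t else (pvSpl t).modifyHead (c :: ·)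

theorem pvSpl_ne_nil (l : List Char) : pvSpl l ≠ [] := by
  induction l with
  | nil => simp [pvSpl]
  | cons c t ih =>
    simp only [pvSpl]
    split_ifs
    · simp
    · cases h : pvSpl t with
      | nil => exact absurd h ih
      | cons a b => simp

theorem pvSplitOn_go_eq : ∀ (fuel : Nat) (l cur : List Char) (acc : List (List Char)),
    l.length < fuel →
    PySem.Chars.splitOn.go ['_'] fuel l cur acc =
      acc.reverse ++ (pvSpl l).modifyHead (cur.reverse ++ ·) := by
  intro fuel
  induction fuel with
  | zero => intro l cur acc h; omega
  | succ n ih =>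
    intro l cur acc h
    cases l with
    | nil =>
      simp [PySem.Chars.splitOn.go, pvSpl]
    | cons c rest =>
      by_cases hc : c = '_'
      · subst hc
        have hp : List.isPrefixOf ['_'] ('_' :: rest) = true := by simp [List.isPrefixOf]
        rw [show PySem.Chars.splitOn.go ['_'] (n+1) ('_' :: rest) cur acc =
              PySem.Chars.splitOn.go ['_'] n (List.drop 1 ('_' :: rest)) [] (cur.reverse :: acc) by
          simp [PySem.Chars.splitOn.go, hp]]
        rw [ih _ _ _ (by simpa using Nat.lt_of_succ_lt_succ h)]
        simp only [pvSpl, List.drop_one, List.tail_cons, List.reverse_cons, List.append_assoc,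
          List.singleton_append, List.reverse_nil]
        cases pvSpl rest <;> simp
      · have hp : List.isPrefixOf ['_'] (c :: rest) = false := by
          simp [List.isPrefixOf]; exact fun h => absurd h.symm hc
        rw [show PySem.Chars.splitOn.go ['_'] (n+1) (c :: rest) cur acc =
              PySem.Chars.splitOn.go ['_'] n rest (c :: cur) acc by
          simp [PySem.Chars.splitOn.go, hp]]
        rw [ih _ _ _ (by simpa using Nat.lt_of_succ_lt_succ h)]
        simp only [pvSpl, if_neg hc]
        cases hs : pvSpl rest with
        | nil => exact absurd hs (pvSpl_ne_nil rest)
        | cons a b => simp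

theorem pvSplitOn_eq (l : List Char) : PySem.Chars.splitOn l ['_'] = pvSpl l := by
  have := pvSplitOn_go_eq (l.length + 1) l [] [] (by omega)
  rw [PySem.Chars.splitOn]
  rw [show l.length + 1 = l.length + 1 from rfl] at this
  rw [this]
  cases pvSpl l <;> simp

def pvMeasC (ps : List (List Char)) : Nat := (ps.map (fun p => 2 * p.length + 1)).sum

theorem pvMeasC_modifyHead (c : Char) (ps : List (List Char)) (h : ps ≠ []) :
    pvMeasC (ps.modifyHead (c :: ·)) = pvMeasC ps + 2 := by
  cases ps with
  | nil => exact absurd rfl h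
  | cons a b => simp [pvMeasC, List.modifyHead]; omega

theorem pvMeasC_spl (l : List Char) : pvMeasC (pvSpl l) + l.count '_' = 2 * l.length + 1 := by
  induction l with
  | nil => simp [pvSpl, pvMeasC]
  | cons c t ih =>
    by_cases hc : c = '_'
    · subst hc
      rw [show pvSpl ('_' :: t) = [] :: pvSpl t by simp [pvSpl]]
      rw [show pvMeasC ([] :: pvSpl t) = 1 + pvMeasC (pvSpl t) by
        simp [pvMeasC]]
      rw [show List.count '_' ('_' :: t) = List.count '_' t + 1 by simp]
      simp only [List.length_cons]
      omega
    · simp only [pvSpl, if_neg hc]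
      rw [pvMeasC_modifyHead _ _ (pvSpl_ne_nil t)]
      simp [hc]
      omega

def pyCapitalize (s : String) : String :=
  match s.toList with
  | [] => ""
  | c :: rest => String.ofList (PySem.Chars.upperChar c :: rest.map PySem.Chars.lowerChar)

def pySplitU (s : String) : List String :=
  (PySem.Chars.splitOn s.toList ['_']).map String.ofList

def pvMeasKs (ks : List String) : Nat := (ks.map (fun s => 2 * s.toList.length + 1)).sum

theorem pvMeasKs_splitU (k : String) (h : PySem.Str.isIn "_" k = true) :
    pvMeasKs (pySplitU k) ≤ 2 * k.toList.length := by
  have hmem : '_' ∈ k.toList := by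
    have := (PySem.Str.isIn_iff_infix "_" k).mp h
    exact this.subset (by simp)
  have hcount : 1 ≤ k.toList.count '_' := List.one_le_count_iff.mpr hmem
  have hm := pvMeasC_spl k.toList
  have : pvMeasKs (pySplitU k) = pvMeasC (pvSpl k.toList) := by
    unfold pvMeasKs pySplitU pvMeasC
    rw [pvSplitOn_eq, List.map_map]
    apply congrArg List.sum
    apply List.map_congr_left
    intro p _
    simp
  omega

def fix_key_py (keys_list : List String) : String :=
  match keys_list with
  | [] => ""
  | k :: rest =>
    (if PySem.Str.isIn "_" k then fix_key_py (pySplitU k) else pyCapitalize k) ++ fix_key_py rest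
termination_by pvMeasKs keys_list
decreasing_by
  all_goals simp only [pvMeasKs, List.map_cons, List.sum_cons]
  · rename_i h
    have := pvMeasKs_splitU k h
    simp only [pvMeasKs] at this
    omega
  · omega

-- ===== PORT B =====
def fix_key_py_alt (keys_list : List String) : String :=
  PySem.Str.join "" ((keys_list.flatMap (fun k => pySplitU k)).map (fun p => pyCapitalize p))


-- ===== PRECONDITION & SPEC =====
def Spec_fix_key_py (keys_list : List String) (out : String) : Prop := out = fix_key_py_alt keys_list
instance (keys_list : List String) (out : String) : Decidable (Spec_fix_key_py keys_list out) := by unfold Spec_fix_key_py; infer_instance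

-- ===== CLAIM (what is proved, stated in full; the proofs are below) =====
def Claim_equal_fix_key_py : Prop := ∀ (keys_list : List String), Dom_fix_key_py keys_list → Spec_fix_key_py keys_list (fix_key_py keys_list)

-- ===== LEMMAS AND PROOFS =====
def pvCapL : List Char → List Char
  | [] => []
  | c :: r => PySem.Chars.upperChar c :: r.map PySem.Chars.lowerChar

def pvOut (ks : List String) : List Char :=
  (ks.flatMap (fun k => pvSpl k.toList)).flatMap pvCapL

theorem toList_pyCapitalize (s : String) : (pyCapitalize s).toList = pvCapL s.toList := by
  unfold pyCapitalize
  cases h : s.toList with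
  | nil => simp [pvCapL]
  | cons c r => simp [pvCapL]

theorem pvSpl_no_us : ∀ (l : List Char), ∀ p ∈ pvSpl l, '_' ∉ p := by
  intro l
  induction l with
  | nil => intro p hp; simp [pvSpl] at hp; simp [hp]
  | cons c t ih =>
    intro p hp
    by_cases hc : c = '_'
    · subst hc
      rw [show pvSpl ('_' :: t) = [] :: pvSpl t by simp [pvSpl]] at hp
      rcases List.mem_cons.mp hp with h | h
      · simp [h]
      · exact ih p h
    · simp only [pvSpl, if_neg hc] at hp
      cases hs : pvSpl t with
      | nil => exact absurd hs (pvSpl_ne_nil t)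
      | cons a b =>
        rw [hs] at hp
        simp only [List.modifyHead, List.mem_cons] at hp
        rcases hp with h | h
        · subst h
          have ha : '_' ∉ a := ih a (by rw [hs]; exact List.mem_cons_self)
          simp [ha]
          intro hh
          exact absurd hh.symm hc
        · exact ih p (by rw [hs]; exact List.mem_cons_of_mem _ h)

theorem pvSpl_of_no_us (l : List Char) (h : '_' ∉ l) : pvSpl l = [l] := by
  induction l with
  | nil => simp [pvSpl]
  | cons c t ih =>
    have hc : c ≠ '_' := fun hh => h (by simp [hh])
    have ht : '_' ∉ t := fun hh => h (by simp [hh])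
    simp only [pvSpl, if_neg hc, ih ht, List.modifyHead]

theorem not_mem_of_not_isIn (k : String) (h : ¬ PySem.Str.isIn "_" k = true) : '_' ∉ k.toList := by
  intro hm
  apply h
  rw [PySem.Str.isIn_iff_infix]
  obtain ⟨s, t, hst⟩ := List.append_of_mem hm
  exact ⟨s, t, by rw [hst]; simp⟩

theorem join_empty (ps : List (List Char)) : PySem.Chars.join [] ps = ps.flatten := by
  induction ps with
  | nil => simp [PySem.Chars.join_nil]
  | cons a b ih =>
    cases b with
    | nil => simp [PySem.Chars.join_singleton]
    | cons x y =>
      rw [PySem.Chars.join_cons_cons]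
      simp [ih]

theorem pvOut_splitU (k : String) : pvOut (pySplitU k) = (pvSpl k.toList).flatMap pvCapL := by
  unfold pvOut pySplitU
  congr 1
  rw [pvSplitOn_eq, List.flatMap_map]
  rw [show (fun p => pvSpl (String.ofList p).toList) = (fun p : List Char => pvSpl p) by
    funext p; simp]
  -- flatMap of pvSpl over pieces with no '_': each gives [p]
  have : ∀ ps : List (List Char), (∀ p ∈ ps, '_' ∉ p) → ps.flatMap (fun p => pvSpl p) = ps := by
    intro ps hps
    induction ps with
    | nil => simp
    | cons a b ihb =>
      rw [List.flatMap_cons, pvSpl_of_no_us a (hps a List.mem_cons_self), ihb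
        (fun p hp => hps p (List.mem_cons_of_mem _ hp))]
      simp
  exact this _ (pvSpl_no_us k.toList)

theorem pvMeasKs_cons (k : String) (rest : List String) :
    pvMeasKs (k :: rest) = 2 * k.toList.length + 1 + pvMeasKs rest := by
  simp [pvMeasKs]

theorem fix_key_py_toList : ∀ (n : Nat) (ks : List String), pvMeasKs ks ≤ n →
    (fix_key_py ks).toList = pvOut ks := by
  intro n
  induction n with
  | zero =>
    intro ks h
    cases ks with
    | nil => simp [fix_key_py, pvOut]
    | cons k rest => rw [pvMeasKs_cons] at h; omega
  | succ n ih =>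
    intro ks h
    cases ks with
    | nil => simp [fix_key_py, pvOut]
    | cons k rest =>
      have hmeas := pvMeasKs_cons k rest
      rw [show fix_key_py (k :: rest) =
            (if PySem.Str.isIn "_" k then fix_key_py (pySplitU k) else pyCapitalize k)
              ++ fix_key_py rest by rw [fix_key_py]]
      rw [String.toList_append]
      rw [show pvOut (k :: rest) = (pvSpl k.toList).flatMap pvCapL ++ pvOut rest by
        simp [pvOut]]
      have hrest : (fix_key_py rest).toList = pvOut rest := ih rest (by omega)
      by_cases hin : PySem.Str.isIn "_" k = true
      · rw [if_pos hin, hrest]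
        have hk := pvMeasKs_splitU k hin
        rw [ih (pySplitU k) (by omega), pvOut_splitU]
      · rw [if_neg hin, hrest, toList_pyCapitalize]
        rw [pvSpl_of_no_us k.toList (not_mem_of_not_isIn k hin)]
        simp

theorem fix_key_py_alt_toList (ks : List String) :
    (fix_key_py_alt ks).toList = pvOut ks := by
  unfold fix_key_py_alt PySem.Str.join
  rw [String.toList_ofList, show ("" : String).toList = [] from rfl, join_empty]
  have hsplit : (ks.flatMap fun k => pySplitU k)
      = (ks.flatMap (fun k => pvSpl k.toList)).map String.ofList := by
    induction ks with
    | nil => simp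
    | cons a b ih => simp [pySplitU, pvSplitOn_eq, List.map_flatMap]
  rw [hsplit, List.map_map, List.map_map]
  have hcap : ∀ p ∈ (ks.flatMap (fun k => pvSpl k.toList)),
      ((String.toList ∘ fun p => pyCapitalize p) ∘ String.ofList) p = pvCapL p := by
    intro p _
    simp [Function.comp, toList_pyCapitalize]
  rw [List.map_congr_left hcap]
  simp [pvOut, List.flatMap_def]


-- ===== VERDICT (by name: the statement is the Claim_ definition above) =====
theorem fix_key_py_spec : Claim_equal_fix_key_py := by
  intro ks _
  unfold Spec_fix_key_py
  apply String.toList_inj.mp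
  rw [fix_key_py_toList (pvMeasKs ks) ks le_rfl, fix_key_py_alt_toList]
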